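-- pv_equiv track=rewrite | github.com/PersonalProjectsDsully/LocalMemory | utils/qa_improvement_system.py | _replace_section_content
-- ===== SOURCE A (Python) =====
-- def _replace_section_content(report_content: str, section_title: str, new_content: str) -> str:
--     """Replace the content of a specific section in the report"""
--     lines = report_content.split('\n')
--     result_lines = []
--     in_section = False
--
--     for line in lines:
--         # Check if this is the start of our target section
--         if line.startswith('##') and section_title.lower() in line.lower():
--             in_section = True
--             result_lines.append(line)  # Keep the header
--             result_lines.append(new_content)  # Add new content
--             continue
--
--         # Check if we've reached the next section
--         elif line.startswith('##') and in_section: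
--             in_section = False
--             result_lines.append(line)  # Add the next section header
--
--         # Add lines if we're not in the target section
--         elif not in_section:
--             result_lines.append(line)
--
--     return '\n'.join(result_lines)
-- ===== SOURCE B (Python) =====
-- def _replace_section_content(report_content: str, section_title: str, new_content: str) -> str:
--     """Replace the content of a specific section in the report (partition-then-transform)."""
--     lines = report_content.split('\n')
--     # Pass 1: partition lines into blocks; each '##' line starts a new block
--     # (the lines before the first '##' form a headerless preamble block).
--     blocks = []
--     current = []
--     for line in lines:
--         if line.startswith('##'):
--             blocks.append(current)
--             current = [line]
--         else:
--             current.append(line)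
--     blocks.append(current)
--     # Pass 2: transform each block independently, then flatten and join.
--     out = []
--     for block in blocks:
--         if block and block[0].startswith('##') and section_title.lower() in block[0].lower():
--             out.append(block[0])
--             out.append(new_content)
--         else:
--             out.extend(block)
--     return '\n'.join(out)
-- ===== Notes on version B (the rewrite author's own statement) =====
-- stated objective: alternative
-- what changed: Replaces A's single-pass state machine with an in_section flag by a two-pass partition-then-transform decomposition: lines are first grouped into blocks each starting at a '##' header line (plus a headerless preamble block), then each block is independently replaced by [header, new_content] if its header matches, and the results are flattened and joined.
import Mathlib
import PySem

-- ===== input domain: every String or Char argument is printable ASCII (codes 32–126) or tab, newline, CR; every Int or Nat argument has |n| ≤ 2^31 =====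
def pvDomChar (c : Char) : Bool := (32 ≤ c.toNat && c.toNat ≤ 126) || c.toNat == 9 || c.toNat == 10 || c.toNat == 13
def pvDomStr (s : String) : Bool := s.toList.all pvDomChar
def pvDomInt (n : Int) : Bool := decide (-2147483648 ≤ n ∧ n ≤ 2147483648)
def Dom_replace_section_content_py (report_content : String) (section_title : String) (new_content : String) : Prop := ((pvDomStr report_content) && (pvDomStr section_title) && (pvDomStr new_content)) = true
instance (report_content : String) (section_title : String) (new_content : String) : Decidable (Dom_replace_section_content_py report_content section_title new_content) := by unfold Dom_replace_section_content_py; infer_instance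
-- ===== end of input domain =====

-- B replaces A's interleaved in_section state machine by a partition-into-blocks-then-transform
-- decomposition (objective: alternative decomposition, same cost).

-- ===== PORT A =====
-- literal port of A's single loop with the in_section flag and result_lines accumulator
def replace_section_content_py (report_content : String) (section_title : String) (new_content : String) : String :=
  let lines := (PySem.Str.split? report_content "\n").getD []   -- sep is the nonempty "\n", so split? is some
  let fin := lines.foldl (fun (st : List String × Bool) line =>
    if PySem.Str.startswith line "##" &&
       PySem.Str.isIn (PySem.Str.lower section_title) (PySem.Str.lower line) then
      (st.1 ++ [line, new_content], true)
    else if PySem.Str.startswith line "##" && st.2 then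
      (st.1 ++ [line], false)
    else if !st.2 then
      (st.1 ++ [line], st.2)
    else
      (st.1, st.2)) ([], false)
  PySem.Str.join "\n" fin.1

-- ===== PORT B =====
-- literal port of Source B: pass 1 partitions the lines into blocks (each '##' line starts a block),
-- pass 2 transforms each block independently and flattens
def replace_section_content_py_alt (report_content : String) (section_title : String) (new_content : String) : String :=
  let lines := (PySem.Str.split? report_content "\n").getD []   -- sep is the nonempty "\n", so split? is some
  let p := lines.foldl (fun (st : List (List String) × List String) line =>
    if PySem.Str.startswith line "##" then (st.1 ++ [st.2], [line])
    else (st.1, st.2 ++ [line])) ([], [])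
  let blocks := p.1 ++ [p.2]
  let out := blocks.foldl (fun out b =>
    match b with
    | [] => out ++ b
    | h :: _ =>
      if PySem.Str.startswith h "##" &&
         PySem.Str.isIn (PySem.Str.lower section_title) (PySem.Str.lower h) then
        out ++ [h, new_content]
      else out ++ b) []
  PySem.Str.join "\n" out

-- ===== PRECONDITION & SPEC =====
def Spec_replace_section_content_py (report_content : String) (section_title : String) (new_content : String) (out : String) : Prop := out = replace_section_content_py_alt report_content section_title new_content
instance (report_content : String) (section_title : String) (new_content : String) (out : String) : Decidable (Spec_replace_section_content_py report_content section_title new_content out) := by unfold Spec_replace_section_content_py; infer_instance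

-- ===== CLAIM (what is proved, stated in full; the proofs are below) =====
def Claim_equal_replace_section_content_py : Prop := ∀ (report_content : String) (section_title : String) (new_content : String), Dom_replace_section_content_py report_content section_title new_content → Spec_replace_section_content_py report_content section_title new_content (replace_section_content_py report_content section_title new_content)

-- ===== LEMMAS AND PROOFS =====
-- All lemmas are generic over the two line tests: m = "matching '##' header", h = "'##' header";
-- they are instantiated with A's and B's concrete tests only in the final theorem.

-- the three loop bodies, named (each is definitionally the corresponding port's lambda)
def gStepA (m h : String → Bool) (nc : String) (st : List String × Bool) (line : String) : List String × Bool :=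
  if m line then (st.1 ++ [line, nc], true)
  else if h line && st.2 then (st.1 ++ [line], false)
  else if !st.2 then (st.1 ++ [line], st.2)
  else (st.1, st.2)

def gStepP (h : String → Bool) (st : List (List String) × List String) (line : String) : List (List String) × List String :=
  if h line then (st.1 ++ [st.2], [line]) else (st.1, st.2 ++ [line])

def gStepT (m : String → Bool) (nc : String) (out : List String) (b : List String) : List String :=
  match b with
  | [] => out ++ b
  | hd :: _ => if m hd then out ++ [hd, nc] else out ++ b

-- A's loop, written as structural recursion building the result list from the front
def gRa (m h : String → Bool) (nc : String) : Bool → List String → List String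
  | _, [] => []
  | s, l :: ls =>
    if m l then l :: nc :: gRa m h nc true ls
    else if h l && s then l :: gRa m h nc false ls
    else if !s then l :: gRa m h nc s ls
    else gRa m h nc s ls

-- B's partition into blocks, written as structural recursion
def gParts (h : String → Bool) : List String → List String → List (List String)
  | cur, [] => [cur]
  | cur, l :: ls => if h l then cur :: gParts h [l] ls else gParts h (cur ++ [l]) ls

-- B's per-block transform
def gTf (m : String → Bool) (nc : String) : List String → List String
  | [] => []
  | hd :: t => if m hd then [hd, nc] else hd :: t

-- whether a block is a matching one (decided by its header line)
def gMB (m : String → Bool) : List String → Bool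
  | [] => false
  | hd :: _ => m hd

theorem gRa_fold (m h : String → Bool) (nc : String) (ls : List String) :
    ∀ (acc : List String) (s : Bool),
    (ls.foldl (gStepA m h nc) (acc, s)).1 = acc ++ gRa m h nc s ls := by
  induction ls with
  | nil => intro acc s; simp [gRa]
  | cons l ls ih =>
    intro acc s
    rw [List.foldl_cons, gStepA]
    cases hm : m l <;> cases hh : h l <;> cases s <;>
      simp [hm, hh, ih, gRa]

theorem gParts_fold (h : String → Bool) (ls : List String) :
    ∀ (blocks : List (List String)) (cur : List String),
    (ls.foldl (gStepP h) (blocks, cur)).1 ++ [(ls.foldl (gStepP h) (blocks, cur)).2]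
    = blocks ++ gParts h cur ls := by
  induction ls with
  | nil => intro blocks cur; simp [gParts]
  | cons l ls ih =>
    intro blocks cur
    rw [List.foldl_cons, gStepP]
    cases hh : h l <;> simp [hh, ih, gParts]

theorem gTf_fold (m : String → Bool) (nc : String) (bs : List (List String)) :
    ∀ (out : List String),
    bs.foldl (gStepT m nc) out = out ++ bs.flatMap (gTf m nc) := by
  induction bs with
  | nil => intro out; simp
  | cons b bs ih =>
    intro out
    rw [List.foldl_cons]
    cases b with
    | nil =>
      have hstep : gStepT m nc out [] = out ++ [] := rfl
      rw [hstep, ih]; simp [gTf]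
    | cons hd t =>
      cases hm : m hd
      · have hstep : gStepT m nc out (hd :: t) = out ++ hd :: t := by simp [gStepT, hm]
        rw [hstep, ih]; simp [gTf, hm]
      · have hstep : gStepT m nc out (hd :: t) = out ++ [hd, nc] := by simp [gStepT, hm]
        rw [hstep, ih]; simp [gTf, hm]

theorem gMB_append (m : String → Bool) (cur : List String) (l : String)
    (hl : m l = false) : gMB m (cur ++ [l]) = gMB m cur := by
  cases cur <;> simp [gMB, hl]

theorem gTf_append_nomatch (m : String → Bool) (nc : String) (cur : List String) (l : String)
    (hcur : gMB m cur = false) (hl : m l = false) :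
    gTf m nc (cur ++ [l]) = gTf m nc cur ++ [l] := by
  cases cur with
  | nil => simp [gTf, hl]
  | cons hd t => simp [gMB] at hcur; simp [gTf, hcur]

theorem gTf_append_match (m : String → Bool) (nc : String) (cur : List String) (l : String)
    (hcur : gMB m cur = true) :
    gTf m nc (cur ++ [l]) = gTf m nc cur := by
  cases cur with
  | nil => simp [gMB] at hcur
  | cons hd t => simp [gMB] at hcur; simp [gTf, hcur]

-- the heart: transforming the blocks of the partition reproduces A's state machine
theorem gMain (m h : String → Bool) (hmh : ∀ l, h l = false → m l = false)
    (nc : String) (ls : List String) :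
    ∀ (cur : List String),
    (gParts h cur ls).flatMap (gTf m nc) = gTf m nc cur ++ gRa m h nc (gMB m cur) ls := by
  induction ls with
  | nil => intro cur; simp [gParts, gRa]
  | cons l ls ih =>
    intro cur
    cases hh : h l
    · have hm' : m l = false := hmh l hh
      simp only [gParts, hh, Bool.false_eq_true, if_false]
      rw [ih (cur ++ [l]), gMB_append m cur l hm']
      cases hs : gMB m cur with
      | false =>
        rw [gTf_append_nomatch m nc cur l hs hm']
        simp [gRa, hm', hh]
      | true =>
        rw [gTf_append_match m nc cur l hs]
        simp [gRa, hm', hh]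
    · simp only [gParts, hh, if_true, List.flatMap_cons]
      rw [ih [l]]
      cases hm : m l
      · cases hs : gMB m cur <;> simp [gRa, gMB, gTf, hm, hh]
      · simp [gRa, gMB, gTf, hm]

-- ties everything together, still generic in the two tests
theorem gAll (m h : String → Bool) (hmh : ∀ l, h l = false → m l = false)
    (nc : String) (lines : List String) :
    (lines.foldl (gStepA m h nc) ([], false)).1
    = ((lines.foldl (gStepP h) ([], [])).1
      ++ [(lines.foldl (gStepP h) ([], [])).2]).foldl (gStepT m nc) [] := by
  rw [gRa_fold m h nc lines [] false, gTf_fold m nc _ [], gParts_fold h lines [] []]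
  simp only [List.nil_append]
  rw [gMain m h hmh nc lines []]
  simp [gTf, gMB]

-- ===== VERDICT (by name: the statement is the Claim_ definition above) =====
theorem replace_section_content_py_spec : Claim_equal_replace_section_content_py := by
  intro rc tt nc _
  show replace_section_content_py rc tt nc = replace_section_content_py_alt rc tt nc
  exact congrArg (PySem.Str.join "\n")
    (gAll (fun l => PySem.Str.startswith l "##" &&
                    PySem.Str.isIn (PySem.Str.lower tt) (PySem.Str.lower l))
          (fun l => PySem.Str.startswith l "##")
          (fun l hl => by
            show (PySem.Str.startswith l "##" &&
                  PySem.Str.isIn (PySem.Str.lower tt) (PySem.Str.lower l)) = false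
            rw [show PySem.Str.startswith l "##" = false from hl]
            exact Bool.false_and _)
          nc ((PySem.Str.split? rc "\n").getD []))
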